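-- pv_equiv track=rewrite | github.com/MrBrantCode/unitest_baseline | mut_generate/mist_train_cf/cf_83171/solution.py | find_maximum_even_divisible
-- ===== SOURCE A (Python) =====
-- def find_maximum_even_divisible(x, y, z):
--     """
--     Returns the largest even integer in the inclusive range of [x, y] that is evenly divisible by z.
--     If no such integer exists or if inputs are invalid, returns -1.
--
--     Args:
--         x (int): The start of the range (inclusive).
--         y (int): The end of the range (inclusive).
--         z (int): The divisor.
--
--     Returns:
--         int: The largest even integer divisible by z, or -1 if no such integer exists or if inputs are invalid.
--     """
--     # Correctly handle negative inputs and fractions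
--     if x < 0 or y <= 0 or z <= 0 or not (x % 1 == 0 and y % 1 == 0 and z % 1 == 0):
--         return -1
--     # If x and y input out of order, swap them
--     if x > y:
--         x, y = y, x
--     # Step down from the largest possible value, y, and test each even number for divisibility
--     for i in range(y, x-1, -1):
--         if i % 2 == 0 and i % z == 0:
--             return i
--     # If no solutions found, return -1
--     return -1
-- ===== SOURCE B (Python) =====
-- def find_maximum_even_divisible(x, y, z):
--     """Closed-form: largest multiple of lcm(2, z) that is <= max(x, y), if it reaches min(x, y)."""
--     if x < 0 or y <= 0 or z <= 0:
--         return -1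
--     lo, hi = (y, x) if x > y else (x, y)
--     step = z if z % 2 == 0 else 2 * z   # lcm(2, z) for z > 0
--     m = (hi // step) * step
--     return m if m >= lo else -1
-- ===== Notes on version B (the rewrite author's own statement) =====
-- stated objective: faster
-- what changed: Replaces A's descending linear scan over [x, y] with a closed-form computation: the largest multiple of lcm(2, z) not exceeding max(x, y), returned if it is at least min(x, y).
import Mathlib
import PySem

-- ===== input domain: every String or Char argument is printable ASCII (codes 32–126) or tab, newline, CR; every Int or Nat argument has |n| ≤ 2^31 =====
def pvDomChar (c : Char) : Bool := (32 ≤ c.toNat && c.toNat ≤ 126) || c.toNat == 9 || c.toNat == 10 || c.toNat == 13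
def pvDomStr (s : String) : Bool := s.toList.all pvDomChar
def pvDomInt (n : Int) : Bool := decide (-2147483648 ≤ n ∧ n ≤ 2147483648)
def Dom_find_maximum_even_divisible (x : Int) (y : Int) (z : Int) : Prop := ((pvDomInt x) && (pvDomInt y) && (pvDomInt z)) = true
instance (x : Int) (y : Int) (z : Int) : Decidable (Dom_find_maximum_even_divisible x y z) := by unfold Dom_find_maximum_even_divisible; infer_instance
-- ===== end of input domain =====

-- B replaces A's descending linear scan of [x, y] with a closed-form largest-multiple-of-lcm(2,z) computation (objective: faster, asymptotic).

-- ===== PORT A =====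
-- the 'for i in range(y, x-1, -1)' loop, fuel = number of iterations remaining, i = current index
def pvLoopA (z : Int) : Nat → Int → Int
  | 0, _ => -1
  | n+1, i =>
    if PySem.Int.mod i 2 == 0 && PySem.Int.mod i z == 0 then i
    else pvLoopA z n (i - 1)

def find_maximum_even_divisible (x : Int) (y : Int) (z : Int) : Int :=
  if x < 0 ∨ y ≤ 0 ∨ z ≤ 0 ∨
     ¬(PySem.Int.mod x 1 = 0 ∧ PySem.Int.mod y 1 = 0 ∧ PySem.Int.mod z 1 = 0) then -1
  else
    let lo := if x > y then y else x
    let hi := if x > y then x else y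
    pvLoopA z ((hi - (lo - 1)).toNat) hi

-- ===== PORT B =====
def find_maximum_even_divisible_alt (x : Int) (y : Int) (z : Int) : Int :=
  if x < 0 ∨ y ≤ 0 ∨ z ≤ 0 then -1
  else
    let lo := if x > y then y else x
    let hi := if x > y then x else y
    let step := if PySem.Int.mod z 2 == 0 then z else 2 * z
    let m := PySem.Int.floordiv hi step * step
    if m ≥ lo then m else -1

-- ===== PRECONDITION & SPEC =====
def Spec_find_maximum_even_divisible (x : Int) (y : Int) (z : Int) (out : Int) : Prop := out = find_maximum_even_divisible_alt x y z
instance (x : Int) (y : Int) (z : Int) (out : Int) : Decidable (Spec_find_maximum_even_divisible x y z out) := by unfold Spec_find_maximum_even_divisible; infer_instance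

-- ===== CLAIM (what is proved, stated in full; the proofs are below) =====
def Claim_equal_find_maximum_even_divisible : Prop := ∀ (x : Int) (y : Int) (z : Int), Dom_find_maximum_even_divisible x y z → Spec_find_maximum_even_divisible x y z (find_maximum_even_divisible x y z)

-- ===== LEMMAS AND PROOFS =====

-- for z > 0 and L = lcm(2, z): the loop condition is exactly divisibility by L
lemma pv_cond_iff_dvd (z i L : Int) (hz : 0 < z)
    (hL : L = if PySem.Int.mod z 2 == 0 then z else 2 * z) :
    ((PySem.Int.mod i 2 == 0 && PySem.Int.mod i z == 0) = true) ↔ L ∣ i := by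
  simp only [Bool.and_eq_true, beq_iff_eq, PySem.Int.mod_eq_zero_iff_dvd] at *
  by_cases h2 : (2:Int) ∣ z
  · have : L = z := by rw [hL, if_pos]; simpa using h2
    subst this
    exact ⟨fun h => h.2, fun h => ⟨dvd_trans h2 h, h⟩⟩
  · have hLz : L = 2 * z := by rw [hL, if_neg]; simpa using h2
    subst hLz
    constructor
    · rintro ⟨⟨a, ha⟩, ⟨b, hb⟩⟩
      -- z odd, 2 ∣ i, z ∣ i ⇒ 2z ∣ i : from 2 ∣ z*b and ¬2∣z get 2 ∣ b
      have h2b : (2:Int) ∣ b := by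
        have hzb : (2:Int) ∣ z * b := ⟨a, by omega⟩
        rcases Int.prime_two.dvd_mul.mp hzb with h | h
        · exact absurd h h2
        · exact h
      rcases h2b with ⟨c, hc⟩
      exact ⟨c, by rw [hb, hc]; ring⟩
    · rintro ⟨a, ha⟩
      exact ⟨⟨z * a, by rw [ha]; ring⟩, ⟨2 * a, by rw [ha]; ring⟩⟩

lemma pv_L_two_le (z L : Int) (hz : 0 < z)
    (hL : L = if PySem.Int.mod z 2 == 0 then z else 2 * z) : 2 ≤ L := by
  by_cases h2 : (PySem.Int.mod z 2 == 0) = true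
  · have : (2:Int) ∣ z := by simpa [PySem.Int.mod_eq_zero_iff_dvd] using h2
    rcases this with ⟨k, hk⟩
    rw [hL, if_pos h2]; omega
  · rw [hL, if_neg h2]; omega

-- loop characterisation: scanning n values down from i finds i - i % L iff i % L < n
lemma pvLoopA_eq (z L : Int) (hz : 0 < z)
    (hL : L = if PySem.Int.mod z 2 == 0 then z else 2 * z) :
    ∀ (n : Nat) (i : Int), 0 ≤ i →
      pvLoopA z n i = if i % L < (n : Int) then i - i % L else -1 := by
  have hL2 : 2 ≤ L := pv_L_two_le z L hz hL
  intro n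
  induction n with
  | zero =>
    intro i hi
    have := Int.emod_nonneg i (by omega : L ≠ 0)
    simp [pvLoopA]; omega
  | succ n ih =>
    intro i hi
    have hnn := Int.emod_nonneg i (by omega : L ≠ 0)
    have hlt := Int.emod_lt_of_pos i (by omega : 0 < L)
    rw [pvLoopA]
    by_cases hc : (PySem.Int.mod i 2 == 0 && PySem.Int.mod i z == 0) = true
    · have hdvd : L ∣ i := (pv_cond_iff_dvd z i L hz hL).mp hc
      have h0 : i % L = 0 := Int.emod_eq_zero_of_dvd hdvd
      rw [if_pos hc, if_pos (by push_cast; omega)]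
      omega
    · have hndvd : ¬ L ∣ i := fun h => hc ((pv_cond_iff_dvd z i L hz hL).mpr h)
      have hne : i % L ≠ 0 := fun h => hndvd (Int.dvd_of_emod_eq_zero h)
      have hi1 : (1:Int) ≤ i := by
        by_contra h
        have hi0 : i = 0 := by omega
        exact hndvd (hi0 ▸ dvd_zero L)
      have h1L : (1:Int) % L = 1 := Int.emod_eq_of_lt (by omega) (by omega)
      have hmod1 : (i - 1) % L = i % L - 1 := by
        rw [Int.sub_emod, h1L]
        exact Int.emod_eq_of_lt (by omega) (by omega)
      rw [if_neg hc, ih (i - 1) (by omega), hmod1]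
      by_cases hcnd : i % L - 1 < (n : Int)
      · rw [if_pos hcnd, if_pos (by push_cast; omega)]; omega
      · rw [if_neg hcnd, if_neg (by push_cast; omega)]

-- core: the scan over [lo, hi] equals the closed form, for 0 ≤ lo ≤ hi, 0 < z
lemma pv_core (lo hi z : Int) (hlo : 0 ≤ lo) (hle : lo ≤ hi) (hz : 0 < z) :
    pvLoopA z ((hi - (lo - 1)).toNat) hi =
      (if PySem.Int.floordiv hi (if PySem.Int.mod z 2 == 0 then z else 2 * z) *
            (if PySem.Int.mod z 2 == 0 then z else 2 * z) ≥ lo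
       then PySem.Int.floordiv hi (if PySem.Int.mod z 2 == 0 then z else 2 * z) *
            (if PySem.Int.mod z 2 == 0 then z else 2 * z)
       else -1) := by
  set L := if PySem.Int.mod z 2 == 0 then z else 2 * z with hLdef
  have hL2 : 2 ≤ L := pv_L_two_le z L hz hLdef
  have hfd : PySem.Int.floordiv hi L * L = hi - hi % L := by
    rw [PySem.Int.floordiv_eq_ediv_of_pos (by omega : (0:Int) < L), mul_comm]
    have := Int.ediv_add_emod hi L
    omega
  have hnn := Int.emod_nonneg hi (by omega : L ≠ 0)
  have htn : ((hi - (lo - 1)).toNat : Int) = hi - lo + 1 := by omega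
  rw [pvLoopA_eq z L hz hLdef _ hi (by omega), hfd]
  by_cases hcase : hi - hi % L ≥ lo
  · rw [if_pos (by rw [htn]; omega), if_pos hcase]
  · rw [if_neg (by rw [htn]; omega), if_neg hcase]

-- ===== VERDICT (by name: the statement is the Claim_ definition above) =====
theorem find_maximum_even_divisible_spec : Claim_equal_find_maximum_even_divisible := by
  unfold Claim_equal_find_maximum_even_divisible Spec_find_maximum_even_divisible
  intro x y z _
  unfold find_maximum_even_divisible find_maximum_even_divisible_alt
  by_cases hbad : x < 0 ∨ y ≤ 0 ∨ z ≤ 0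
  · rw [if_pos (by tauto), if_pos hbad]
  · push_neg at hbad
    obtain ⟨hx, hy, hz⟩ := hbad
    have hmods : PySem.Int.mod x 1 = 0 ∧ PySem.Int.mod y 1 = 0 ∧ PySem.Int.mod z 1 = 0 := by
      refine ⟨?_, ?_, ?_⟩ <;>
        simp [PySem.Int.mod_eq_emod_of_pos (by omega : (0:Int) < 1)]
    have hgA : ¬(x < 0 ∨ y ≤ 0 ∨ z ≤ 0 ∨
        ¬(PySem.Int.mod x 1 = 0 ∧ PySem.Int.mod y 1 = 0 ∧ PySem.Int.mod z 1 = 0)) := by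
      push_neg
      exact ⟨by omega, by omega, by omega, hmods⟩
    have hgB : ¬(x < 0 ∨ y ≤ 0 ∨ z ≤ 0) := by omega
    rw [if_neg hgA, if_neg hgB]
    by_cases hxy : x > y
    · simp only [if_pos hxy]
      exact pv_core y x z (by omega) (by omega) (by omega)
    · simp only [if_neg hxy]
      exact pv_core x y z (by omega) (by omega) (by omega)
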